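-- pv_equiv track=rewrite | github.com/uujinn/Algorithm-Study | Programmers/체육복-NY.py | solution
-- ===== SOURCE A (Python) =====
-- def solution(n, lost, reserve):
--     lost = sorted(lost)
--     reserve = sorted(reserve)
--     for l in lost[:]:
--         if l in reserve:
--             lost.remove(l)
--             reserve.remove(l)
--
--     answer = n - len(lost)
--     index = 0
--     for r in reserve:
--         for i in range(index, len(lost)):
--             if lost[i]==r or lost[i]+1==r or lost[i]-1==r:
--                 answer += 1
--                 index = i + 1
--                 break
--     return answer
-- ===== SOURCE B (Python) =====
-- def solution(n, lost, reserve):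
--     cl, cr = {}, {}
--     for x in lost:
--         cl[x] = cl.get(x, 0) + 1
--     for x in reserve:
--         cr[x] = cr.get(x, 0) + 1
--     L = sorted(x for v, c in cl.items() for x in [v] * (c - cr.get(v, 0)))
--     R = sorted(x for v, c in cr.items() for x in [v] * (c - cl.get(v, 0)))
--     ans = n - len(L)
--     j = 0
--     for r in R:
--         while j < len(L) and L[j] < r - 1:
--             j += 1
--         if j < len(L) and L[j] <= r + 1:
--             ans += 1
--             j += 1
--     return ans
-- ===== Notes on version B (the rewrite author's own statement) =====
-- stated objective: faster
-- what changed: Replaces A's quadratic passes (list.remove/'in' scans for the intersection and a rescanning inner loop for the matching) by dict counters for the multiset difference plus a single two-pointer sweep over the two sorted lists.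
import Mathlib
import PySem

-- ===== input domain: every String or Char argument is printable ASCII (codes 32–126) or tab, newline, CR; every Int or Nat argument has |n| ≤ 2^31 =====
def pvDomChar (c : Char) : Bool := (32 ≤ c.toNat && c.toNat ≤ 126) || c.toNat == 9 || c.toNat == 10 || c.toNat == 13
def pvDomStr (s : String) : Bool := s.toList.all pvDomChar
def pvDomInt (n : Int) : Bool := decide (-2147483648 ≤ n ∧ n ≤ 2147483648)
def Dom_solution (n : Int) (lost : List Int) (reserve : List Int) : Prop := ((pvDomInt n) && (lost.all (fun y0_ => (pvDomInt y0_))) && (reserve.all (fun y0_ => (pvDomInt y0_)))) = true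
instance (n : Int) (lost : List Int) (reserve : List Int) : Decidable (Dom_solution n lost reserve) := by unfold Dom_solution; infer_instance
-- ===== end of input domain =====

-- B replaces A's quadratic remove/'in' scans and rescanning inner loop by dict counters
-- (multiset difference) plus one two-pointer sweep over the two sorted lists; measured faster.

-- ===== PORT A =====
-- inner 'for i in range(index, len(lost)): … break' of A
def solutionInnerA (lost2 : List Int) (r : Int) : List Int → Int → Int → Int × Int
  | [], ans, index => (ans, index)
  | i :: is, ans, index =>
      let x := PySem.List.pyGetD lost2 i 0
      if x == r || x + 1 == r || x - 1 == r then (ans + 1, i + 1)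
      else solutionInnerA lost2 r is ans index

def solution (n : Int) (lost : List Int) (reserve : List Int) : Int :=
  let lost1 := PySem.List.sorted lost (fun x => x) false
  let reserve1 := PySem.List.sorted reserve (fun x => x) false
  let p := lost1.foldl (fun (s : List Int × List Int) l =>
      if l ∈ s.2 then ((PySem.List.remove? s.1 l).getD s.1, (PySem.List.remove? s.2 l).getD s.2)
      else s) (lost1, reserve1)
  let res := p.2.foldl (fun (s : Int × Int) r =>
      solutionInnerA p.1 r (PySem.List.pyRange s.2 (p.1.length : Int)) s.1 s.2)
      (n - (p.1.length : Int), 0)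
  res.1

-- ===== PORT B =====
-- 'cl[x] = cl.get(x, 0) + 1' counting loop of B
def solutionCounter (xs : List Int) : PySem.Dict Int Int :=
  xs.foldl (fun d x => d.insert x (d.getD x 0 + 1)) PySem.Dict.empty

-- 'sorted(x for v, c in a.items() for x in [v] * (c - b.get(v, 0)))' of B
def solutionDiffList (a b : PySem.Dict Int Int) : List Int :=
  PySem.List.sorted (a.items.flatMap (fun p => List.replicate (p.2 - b.getD p.1 0).toNat p.1))
    (fun x => x) false

-- 'while j < len(L) and L[j] < r - 1: j += 1' of B
def solutionWhileB (L : List Int) (r : Int) (j : Nat) : Nat :=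
  if h : j < L.length ∧ PySem.List.pyGetD L (j : Int) 0 < r - 1 then solutionWhileB L r (j + 1)
  else j
termination_by L.length - j
decreasing_by omega

def solution_alt (n : Int) (lost : List Int) (reserve : List Int) : Int :=
  let cl := solutionCounter lost
  let cr := solutionCounter reserve
  let L := solutionDiffList cl cr
  let R := solutionDiffList cr cl
  let res := R.foldl (fun (s : Int × Nat) r =>
      let j := solutionWhileB L r s.2
      if j < L.length ∧ PySem.List.pyGetD L (j : Int) 0 ≤ r + 1 then (s.1 + 1, j + 1)
      else (s.1, j))
      (n - (L.length : Int), 0)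
  res.1

-- ===== PRECONDITION & SPEC =====
def Spec_solution (n : Int) (lost : List Int) (reserve : List Int) (out : Int) : Prop := out = solution_alt n lost reserve
instance (n : Int) (lost : List Int) (reserve : List Int) (out : Int) : Decidable (Spec_solution n lost reserve out) := by unfold Spec_solution; infer_instance

-- ===== CLAIM (what is proved, stated in full; the proofs are below) =====
def Claim_equal_solution : Prop := ∀ (n : Int) (lost : List Int) (reserve : List Int), Dom_solution n lost reserve → Spec_solution n lost reserve (solution n lost reserve)

-- ===== LEMMAS AND PROOFS =====

def fmatch (L : List Int) (r : Int) (i : Nat) : Option Nat :=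
  if h : i < L.length then
    if r - 1 ≤ L[i] ∧ L[i] ≤ r + 1 then some i else fmatch L r (i + 1)
  else none
termination_by L.length - i

theorem whileB_ge (L : List Int) (r : Int) (j : Nat) : j ≤ solutionWhileB L r j := by
  fun_induction solutionWhileB L r j with
  | case1 j h ih => omega
  | case2 j h => omega

theorem whileB_le (L : List Int) (r : Int) (j : Nat) (h : j ≤ L.length) :
    solutionWhileB L r j ≤ L.length := by
  fun_induction solutionWhileB L r j with
  | case1 j h ih => exact ih (by omega)
  | case2 j h => omega

theorem whileB_skipped (L : List Int) (r : Int) (j : Nat) :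
    ∀ k (hk : k < L.length), j ≤ k → k < solutionWhileB L r j → L[k] < r - 1 := by
  fun_induction solutionWhileB L r j with
  | case1 j h ih =>
    intro k hk h1 h2
    rcases Nat.eq_or_lt_of_le h1 with rfl | h3
    · have := h.2
      rwa [PySem.List.pyGetD_natCast, List.getD_eq_getElem?_getD, List.getElem?_eq_getElem hk,
        Option.getD_some] at this
    · exact ih k hk h3 h2
  | case2 j h => intro k hk h1 h2; omega

theorem whileB_stop (L : List Int) (r : Int) (j : Nat)
    (h : solutionWhileB L r j < L.length) : r - 1 ≤ L[solutionWhileB L r j] := by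
  fun_induction solutionWhileB L r j with
  | case1 j hc ih => exact ih h
  | case2 j hc =>
    by_contra hlt
    apply hc
    refine ⟨h, ?_⟩
    rw [PySem.List.pyGetD_natCast, List.getD_eq_getElem?_getD, List.getElem?_eq_getElem h,
      Option.getD_some]
    omega

theorem fmatch_skip (L : List Int) (r : Int) (i m : Nat) (him : i ≤ m)
    (hfail : ∀ k (hk : k < L.length), i ≤ k → k < m → L[k] < r - 1) :
    fmatch L r i = fmatch L r m := by
  rcases Nat.eq_or_lt_of_le him with rfl | hlt
  · rfl
  · by_cases hi : i < L.length
    · rw [fmatch]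
      have hf := hfail i hi (le_refl i) hlt
      rw [dif_pos hi, if_neg (by omega)]
      exact fmatch_skip L r (i+1) m (by omega) (fun k hk h1 h2 => hfail k hk (by omega) h2)
    · have : m ≥ L.length := by omega
      rw [fmatch, dif_neg hi, fmatch, dif_neg (by omega)]
termination_by m - i

theorem fmatch_none (L : List Int) (r : Int) (i : Nat)
    (hL : List.Pairwise (· ≤ ·) L)
    (h : ∀ (hi : i < L.length), r + 1 < L[i]) : fmatch L r i = none := by
  rw [fmatch]
  by_cases hi : i < L.length
  · rw [dif_pos hi, if_neg (by have := h hi; omega)]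
    apply fmatch_none L r (i+1) hL
    intro hi1
    have := List.pairwise_iff_getElem.mp hL i (i+1) hi hi1 (by omega)
    have := h hi
    omega
  · rw [dif_neg hi]
termination_by L.length - i

theorem fmatch_some (L : List Int) (r : Int) (i : Nat) (hi : i < L.length)
    (h1 : r - 1 ≤ L[i]) (h2 : L[i] ≤ r + 1) : fmatch L r i = some i := by
  rw [fmatch, dif_pos hi, if_pos ⟨h1, h2⟩]

theorem innerA_spec (L : List Int) (r : Int) (i : Nat) (ans index : Int) :
    solutionInnerA L r (PySem.List.pyRange (i : Int) (L.length : Int)) ans index =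
      (match fmatch L r i with
        | some k => (ans + 1, (k : Int) + 1)
        | none => (ans, index)) := by
  by_cases hi : i < L.length
  · rw [PySem.List.pyRange_one_cons (by exact_mod_cast hi), fmatch, dif_pos hi]
    have hx : PySem.List.pyGetD L (i : Int) 0 = L[i] := by
      rw [PySem.List.pyGetD_natCast, List.getD_eq_getElem?_getD, List.getElem?_eq_getElem hi,
        Option.getD_some]
    by_cases hc : r - 1 ≤ L[i] ∧ L[i] ≤ r + 1
    · rw [if_pos hc]
      show (if _ then _ else _) = _
      rw [if_pos]
      simp only [hx, beq_iff_eq, Bool.or_eq_true]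
      omega
    · rw [if_neg hc]
      show (if _ then _ else _) = _
      rw [if_neg]
      · have : ((i : Int) + 1) = ((i + 1 : Nat) : Int) := by push_cast; ring
        rw [this]
        exact innerA_spec L r (i+1) ans index
      · simp only [hx, beq_iff_eq, Bool.or_eq_true]
        omega
  · rw [PySem.List.pyRange_one_eq_nil (by exact_mod_cast Nat.le_of_not_lt hi), fmatch, dif_neg hi]
    rfl
termination_by L.length - i

theorem greedy_eq (L : List Int) (hL : List.Pairwise (· ≤ ·) L) :
    ∀ (R : List Int), List.Pairwise (· ≤ ·) R → ∀ (ans : Int) (index j : Nat),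
      index ≤ j → j ≤ L.length →
      (∀ k (hk : k < L.length), index ≤ k → k < j → ∀ r ∈ R, L[k] < r - 1) →
      (R.foldl (fun (s : Int × Int) r =>
          solutionInnerA L r (PySem.List.pyRange s.2 (L.length : Int)) s.1 s.2)
        (ans, (index : Int))).1 =
      (R.foldl (fun (s : Int × Nat) r =>
          let j := solutionWhileB L r s.2
          if j < L.length ∧ PySem.List.pyGetD L (j : Int) 0 ≤ r + 1 then (s.1 + 1, j + 1)
          else (s.1, j)) (ans, j)).1 := by
  intro R
  induction R with
  | nil => intro _ ans index j _ _ _; rfl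
  | cons r R' ih =>
    intro hR ans index j hij hjL hinv
    simp only [List.foldl_cons]
    set j' := solutionWhileB L r j with hj'
    have hjj' : j ≤ j' := whileB_ge L r j
    have hj'L : j' ≤ L.length := whileB_le L r j hjL
    have hskip : fmatch L r index = fmatch L r j' := by
      apply fmatch_skip L r index j' (by omega)
      intro k hk h1 h2
      by_cases hkj : k < j
      · exact hinv k hk h1 hkj r (by simp)
      · exact whileB_skipped L r j k hk (by omega) h2
    have hstep := innerA_spec L r index ans index
    have hRtail : List.Pairwise (· ≤ ·) R' := (List.pairwise_cons.mp hR).2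
    have hhead : ∀ r' ∈ R', r ≤ r' := (List.pairwise_cons.mp hR).1
    by_cases hb : j' < L.length ∧ PySem.List.pyGetD L (j' : Int) 0 ≤ r + 1
    · have hx : PySem.List.pyGetD L (j' : Int) 0 = L[j'] := by
        rw [PySem.List.pyGetD_natCast, List.getD_eq_getElem?_getD,
          List.getElem?_eq_getElem hb.1, Option.getD_some]
      have hfm : fmatch L r index = some j' := by
        rw [hskip]
        exact fmatch_some L r j' hb.1 (whileB_stop L r j hb.1) (hx ▸ hb.2)
      rw [hstep, hfm, if_pos hb]
      simp only []
      have hcast : ((j' : Int) + 1) = (((j' + 1 : Nat)) : Int) := by push_cast; ring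
      rw [hcast]
      exact ih hRtail (ans + 1) (j' + 1) (j' + 1) (le_refl _) (by omega)
        (fun k hk h1 h2 => absurd (Nat.lt_of_le_of_lt h1 h2) (lt_irrefl _))
    · have hfm : fmatch L r index = none := by
        rw [hskip]
        apply fmatch_none L r j' hL
        intro hj'len
        have hx : PySem.List.pyGetD L (j' : Int) 0 = L[j'] := by
          rw [PySem.List.pyGetD_natCast, List.getD_eq_getElem?_getD,
            List.getElem?_eq_getElem hj'len, Option.getD_some]
        by_contra hle
        exact hb ⟨hj'len, by omega⟩
      rw [hstep, hfm, if_neg hb]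
      apply ih hRtail ans index j' (by omega) hj'L
      intro k hk h1 h2 r' hr'
      by_cases hkj : k < j
      · exact hinv k hk h1 hkj r' (by simp [hr'])
      · have h3 := whileB_skipped L r j k hk (by omega) h2
        have := hhead r' hr'
        omega

theorem phase1_spec (xs : List Int) : ∀ (l r : List Int),
    (∀ u, xs.count u ≤ l.count u) →
    (∀ v, (xs.foldl (fun (s : List Int × List Int) l =>
        if l ∈ s.2 then ((PySem.List.remove? s.1 l).getD s.1, (PySem.List.remove? s.2 l).getD s.2)
        else s) (l, r)).1.count v = l.count v - min (xs.count v) (r.count v)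
      ∧ (xs.foldl (fun (s : List Int × List Int) l =>
        if l ∈ s.2 then ((PySem.List.remove? s.1 l).getD s.1, (PySem.List.remove? s.2 l).getD s.2)
        else s) (l, r)).2.count v = r.count v - min (xs.count v) (r.count v)) := by
  induction xs with
  | nil => intro l r _ v; simp
  | cons x xs ih =>
    intro l r hcnt v
    simp only [List.foldl_cons]
    by_cases hx : x ∈ r
    · have hxl : x ∈ l := by
        have h1 := hcnt x
        rw [List.count_cons_self] at h1
        exact List.count_pos_iff.mp (by omega)
      rw [if_pos hx, PySem.List.remove?_eq_some_erase l x hxl, Option.getD_some,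
        PySem.List.remove?_eq_some_erase r x hx, Option.getD_some]
      have hcnt' : ∀ u, xs.count u ≤ (l.erase x).count u := by
        intro u
        by_cases hux : u = x
        · subst hux
          have := hcnt u
          rw [List.count_cons_self] at this
          rw [List.count_erase_self]
          omega
        · rw [List.count_erase_of_ne hux]
          have := hcnt u
          rw [List.count_cons_of_ne (Ne.symm hux)] at this
          exact this
      have hmain := ih (l.erase x) (r.erase x) hcnt' v
      by_cases hvx : v = x
      · subst hvx
        have hvr : 0 < r.count v := List.count_pos_iff.mpr hx
        have hvl : xs.count v + 1 ≤ l.count v := by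
          have := hcnt v; rwa [List.count_cons_self] at this
        rw [List.count_cons_self]
        rw [List.count_erase_self, List.count_erase_self] at hmain
        omega
      · rw [List.count_cons_of_ne (Ne.symm hvx)]
        rw [List.count_erase_of_ne hvx, List.count_erase_of_ne hvx] at hmain
        exact hmain
    · rw [if_neg hx]
      have hvr0 : ∀ u, u = x → r.count u = 0 := by
        intro u hu; subst hu; exact List.count_eq_zero.mpr hx
      have hcnt' : ∀ u, xs.count u ≤ l.count u := by
        intro u
        have := hcnt u
        by_cases hux : u = x
        · subst hux; rw [List.count_cons_self] at this; omega
        · rwa [List.count_cons_of_ne (Ne.symm hux)] at this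
      have hmain := ih l r hcnt' v
      by_cases hvx : v = x
      · subst hvx
        have := hvr0 v rfl
        rw [List.count_cons_self]
        omega
      · rw [List.count_cons_of_ne (Ne.symm hvx)]
        exact hmain

theorem phase1_pairwise (xs : List Int) : ∀ (l r : List Int),
    List.Pairwise (· ≤ ·) l → List.Pairwise (· ≤ ·) r →
    List.Pairwise (· ≤ ·) (xs.foldl (fun (s : List Int × List Int) l =>
        if l ∈ s.2 then ((PySem.List.remove? s.1 l).getD s.1, (PySem.List.remove? s.2 l).getD s.2)
        else s) (l, r)).1
    ∧ List.Pairwise (· ≤ ·) (xs.foldl (fun (s : List Int × List Int) l =>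
        if l ∈ s.2 then ((PySem.List.remove? s.1 l).getD s.1, (PySem.List.remove? s.2 l).getD s.2)
        else s) (l, r)).2 := by
  induction xs with
  | nil => intro l r hl hr; exact ⟨hl, hr⟩
  | cons x xs ih =>
    intro l r hl hr
    simp only [List.foldl_cons]
    by_cases hx : x ∈ r
    · rw [if_pos hx, PySem.List.remove?_eq_some_erase r x hx, Option.getD_some]
      have h1 : List.Pairwise (· ≤ ·) ((PySem.List.remove? l x).getD l) := by
        by_cases hxl : x ∈ l
        · rw [PySem.List.remove?_eq_some_erase l x hxl, Option.getD_some]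
          exact hl.sublist (List.erase_sublist ..)
        · have hnone : PySem.List.remove? l x = none := (PySem.List.remove?_eq_none_iff l x).mpr hxl
          rw [hnone, Option.getD_none]; exact hl
      exact ih _ _ h1 (hr.sublist (List.erase_sublist ..))
    · rw [if_neg hx]
      exact ih l r hl hr

theorem counter_eq (xs : List Int) : solutionCounter xs = PySem.Dict.counter xs := rfl

theorem count_flat_notmem (items : List (Int × Int)) (g : Int × Int → Int) (v : Int)
    (hv : ∀ p ∈ items, p.1 ≠ v) :
    (items.flatMap (fun p => List.replicate (g p).toNat p.1)).count v = 0 := by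
  induction items with
  | nil => rfl
  | cons q rest ih =>
    simp only [List.flatMap_cons, List.count_append]
    rw [List.count_replicate, if_neg (by simpa using hv q (List.mem_cons_self ..)),
      ih (fun p hp => hv p (List.mem_cons_of_mem q hp))]

theorem count_flat_mem (items : List (Int × Int)) (g : Int × Int → Int) (v c : Int)
    (hn : (items.map Prod.fst).Nodup) (hm : (v, c) ∈ items) :
    (items.flatMap (fun p => List.replicate (g p).toNat p.1)).count v = (g (v, c)).toNat := by
  induction items with
  | nil => cases hm
  | cons q rest ih =>
    rw [List.map_cons] at hn
    have hn1 := (List.nodup_cons.mp hn).1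
    have hn2 := (List.nodup_cons.mp hn).2
    simp only [List.flatMap_cons, List.count_append]
    rcases List.mem_cons.mp hm with heq | hrest
    · subst heq
      have hn1' : v ∉ rest.map Prod.fst := hn1
      rw [List.count_replicate, if_pos (by simp),
        count_flat_notmem rest g v
          (fun p hp hpv => hn1' (hpv ▸ List.mem_map_of_mem (f := Prod.fst) hp))]
      omega
    · have hvr : v ∈ rest.map Prod.fst := by
        have := List.mem_map_of_mem (f := Prod.fst) hrest
        simpa using this
      have hq : q.1 ≠ v := fun h => hn1 (h ▸ hvr)
      rw [List.count_replicate, if_neg (by simpa using hq), ih hn2 hrest]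
      omega

theorem items_get (l : List (Int × Int)) (hn : (l.map Prod.fst).Nodup) (p : Int × Int)
    (hp : p ∈ l) : (PySem.Dict.mk l).get? p.1 = some p.2 := by
  induction l with
  | nil => cases hp
  | cons q rest ih =>
    rw [List.map_cons] at hn
    have hn1 := (List.nodup_cons.mp hn).1
    have hn2 := (List.nodup_cons.mp hn).2
    rw [PySem.Dict.get?_mk_cons]
    rcases List.mem_cons.mp hp with rfl | hrest
    · rw [if_pos (by simp)]
    · have hq : q.1 ≠ p.1 := fun h => by
        have : p.1 ∈ rest.map Prod.fst := List.mem_map_of_mem hrest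
        exact hn1 (h ▸ this)
      rw [if_neg (by simpa using hq)]
      exact ih hn2 hrest

theorem diffList_count (a b : List Int) (v : Int) :
    (solutionDiffList (solutionCounter a) (solutionCounter b)).count v =
      a.count v - b.count v := by
  rw [counter_eq, counter_eq]
  unfold solutionDiffList
  rw [(PySem.List.sorted_perm _ _ _).count_eq]
  have hn : ((PySem.Dict.counter a).items.map Prod.fst).Nodup :=
    PySem.Dict.nodup_keys_counter a
  by_cases hv : v ∈ (PySem.Dict.counter a).items.map Prod.fst
  · rcases List.mem_map.mp hv with ⟨p, hp, hpv⟩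
    have hget : (PySem.Dict.counter a).get? v = some p.2 := by
      have := items_get (PySem.Dict.counter a).items hn p hp
      rwa [hpv] at this
    have hgd : (PySem.Dict.counter a).getD v 0 = p.2 := by
      show ((PySem.Dict.counter a).get? v).getD 0 = p.2
      rw [hget]; rfl
    have hp2 : p.2 = (a.count v : Int) := by
      rw [← hgd, PySem.Dict.getD_counter]
    have hvp : (v, p.2) = p := by cases p; simp_all
    have hmain := count_flat_mem (PySem.Dict.counter a).items
      (fun p => p.2 - (PySem.Dict.counter b).getD p.1 0) v p.2 hn (by rw [hvp]; exact hp)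
    rw [hmain]
    change ((p.2 : Int) - (PySem.Dict.counter b).getD v 0).toNat = _
    rw [hp2, PySem.Dict.getD_counter]
    omega
  · rw [count_flat_notmem _ (fun p => p.2 - (PySem.Dict.counter b).getD p.1 0) v
      (fun p hp hpv => hv (hpv ▸ List.mem_map_of_mem hp))]
    have hz : a.count v = 0 := by
      rw [List.count_eq_zero]
      intro hva
      apply hv
      have : v ∈ (PySem.Dict.counter a).keys := by
        rw [PySem.Dict.keys_counter]
        exact (PySem.Set.mem_ofList a v).mpr hva
      exact this
    omega

theorem diffList_pairwise (a b : PySem.Dict Int Int) :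
    List.Pairwise (· ≤ ·) (solutionDiffList a b) :=
  PySem.List.sorted_pairwise _ _


theorem solution_eq_alt (n : Int) (lost reserve : List Int) :
    solution n lost reserve = solution_alt n lost reserve := by
  unfold solution solution_alt
  simp only []
  set L1 := PySem.List.sorted lost (fun x => x) false with hL1
  set R1 := PySem.List.sorted reserve (fun x => x) false with hR1
  set P := L1.foldl (fun (s : List Int × List Int) l =>
      if l ∈ s.2 then ((PySem.List.remove? s.1 l).getD s.1, (PySem.List.remove? s.2 l).getD s.2)
      else s) (L1, R1) with hP
  set LB := solutionDiffList (solutionCounter lost) (solutionCounter reserve) with hLB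
  set RB := solutionDiffList (solutionCounter reserve) (solutionCounter lost) with hRB
  have hs := phase1_spec L1 L1 R1 (fun u => le_refl _)
  rw [← hP] at hs
  have hp := phase1_pairwise L1 L1 R1 (PySem.List.sorted_pairwise lost (fun x => x))
    (PySem.List.sorted_pairwise reserve (fun x => x))
  rw [← hP] at hp
  have e1 : ∀ v, L1.count v = lost.count v :=
    fun v => List.Perm.count_eq (PySem.List.sorted_perm lost (fun x => x) false) v
  have e2 : ∀ v, R1.count v = reserve.count v :=
    fun v => List.Perm.count_eq (PySem.List.sorted_perm reserve (fun x => x) false) v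
  have hPL : P.1 = LB := by
    apply PySem.List.eq_of_perm_of_pairwise_le_of_injective (fun x => x) (fun a b h => h)
      (List.perm_iff_count.mpr ?_) hp.1 (diffList_pairwise _ _)
    intro v
    rw [(hs v).1, diffList_count, e1 v, e2 v]
    omega
  have hPR : P.2 = RB := by
    apply PySem.List.eq_of_perm_of_pairwise_le_of_injective (fun x => x) (fun a b h => h)
      (List.perm_iff_count.mpr ?_) hp.2 (diffList_pairwise _ _)
    intro v
    rw [(hs v).2, diffList_count, e1 v, e2 v]
    omega
  rw [hPL, hPR]
  have hmain := greedy_eq LB (diffList_pairwise _ _) RB (diffList_pairwise _ _)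
    (n - (LB.length : Int)) 0 0 (le_refl 0) (Nat.zero_le _)
    (fun k hk h1 h2 => absurd h2 (Nat.not_lt_zero k))
  rw [Nat.cast_zero] at hmain
  exact hmain

-- ===== VERDICT (by name: the statement is the Claim_ definition above) =====
theorem solution_spec : Claim_equal_solution := by
  intro n lost reserve _
  exact solution_eq_alt n lost reserve
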